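-- pv_equiv track=rewrite | github.com/sinaahmadi/ScriptNormalization | code/synthesize.py | tsv_to_dict
-- ===== SOURCE A (Python) =====
-- def tsv_to_dict(text):
--     # convert the script map to a dctionary
--     text_dict = dict()
--     for i in text:
--         i_s = i.split("\t")[0] # source letter
--         if i_s not in text_dict:
--             text_dict[i_s] = list()
--         for j in range(1, len(i.split("\t"))):
--             if i.split("\t")[j] != "":
--                 i_t = i.split("\t")[j] # target letter
--                 if i_t == "NULL":
--                     i_t = ""
--
--                 if i_t not in text_dict[i_s]:
--                     text_dict[i_s].append(i_t) # a big value to make it more impactful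
--
--     return text_dict
-- ===== SOURCE B (Python) =====
-- def tsv_to_dict(text):
--     # Pass 1: accumulate every cleaned target (skip "", map "NULL" -> "") per source.
--     acc = {}
--     for row in text:
--         fields = row.split("\t")
--         targets = acc.setdefault(fields[0], [])
--         for f in fields[1:]:
--             if f != "":
--                 targets.append("" if f == "NULL" else f)
--     # Pass 2: dedup keeping first-occurrence order.
--     return {src: list(dict.fromkeys(vals)) for src, vals in acc.items()}
-- ===== Notes on version B (the rewrite author's own statement) =====
-- stated objective: alternative
-- what changed: Replaces A's interleaved per-insert membership scan and per-index re-splitting with two separate passes: one pass accumulates all cleaned targets per source via setdefault and plain appends, a second pass deduplicates each value list with dict.fromkeys preserving first-occurrence order.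
import Mathlib
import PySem

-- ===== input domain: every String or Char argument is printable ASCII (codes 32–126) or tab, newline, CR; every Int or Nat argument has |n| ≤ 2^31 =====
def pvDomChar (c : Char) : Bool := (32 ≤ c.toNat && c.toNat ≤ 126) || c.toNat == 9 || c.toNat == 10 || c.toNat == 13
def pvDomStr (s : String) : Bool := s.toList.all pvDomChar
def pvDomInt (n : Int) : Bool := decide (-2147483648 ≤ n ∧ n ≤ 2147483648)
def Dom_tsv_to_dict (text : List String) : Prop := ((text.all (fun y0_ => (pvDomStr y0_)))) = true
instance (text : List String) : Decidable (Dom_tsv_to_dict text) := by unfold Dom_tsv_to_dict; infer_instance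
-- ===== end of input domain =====

-- B separates accumulation from deduplication: one pass appends all cleaned targets per source, a second pass dedups each value list in first-occurrence order (alternative decomposition, same results).


-- ===== PORT A =====
-- i.split("\t"): split? is some whenever the separator is nonempty
def pySplitTab (s : String) : List String := (PySem.Str.split? s "\t").getD []

def tsv_to_dict (text : List String) : List (String × List String) :=
  (text.foldl (fun text_dict i =>
      let i_s := (pySplitTab i).headD ""   -- i.split("\t")[0]; split with a separator never yields []
      let text_dict := if text_dict.contains i_s = false then text_dict.insert i_s ([] : List String) else text_dict
      (PySem.List.pyRange 1 ((pySplitTab i).length : Int) 1).foldl (fun text_dict j =>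
        if PySem.List.pyGetD (pySplitTab i) j "" ≠ "" then
          let i_t := PySem.List.pyGetD (pySplitTab i) j ""
          let i_t := if i_t = "NULL" then "" else i_t
          if i_t ∉ text_dict.getD i_s [] then text_dict.modify i_s [] (· ++ [i_t]) else text_dict
        else text_dict) text_dict)
    (PySem.Dict.empty : PySem.Dict String (List String))).items

-- ===== PORT B =====
def tsv_to_dict_alt (text : List String) : List (String × List String) :=
  let acc := text.foldl (fun acc row =>
      let fields := pySplitTab row
      let src := fields.headD ""                        -- fields[0]; split with a separator never yields []
      let acc := acc.setdefault src ([] : List String)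
      fields.tail.foldl (fun acc f =>
        if f ≠ "" then acc.modify src [] (· ++ [if f = "NULL" then "" else f]) else acc) acc)
    (PySem.Dict.empty : PySem.Dict String (List String))
  acc.items.map (fun p => (p.1, PySem.List.dedup p.2))

-- ===== PRECONDITION & SPEC =====
def Spec_tsv_to_dict (text : List String) (out : List (String × List String)) : Prop := out = tsv_to_dict_alt text
instance (text : List String) (out : List (String × List String)) : Decidable (Spec_tsv_to_dict text out) := by unfold Spec_tsv_to_dict; infer_instance

-- ===== CLAIM (what is proved, stated in full; the proofs are below) =====
def Claim_equal_tsv_to_dict : Prop := ∀ (text : List String), Dom_tsv_to_dict text → Spec_tsv_to_dict text (tsv_to_dict text)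

-- ===== LEMMAS AND PROOFS =====

-- the "dedup every value" view of an accumulator dict
def dmap (d : PySem.Dict String (List String)) : PySem.Dict String (List String) :=
  PySem.Dict.mk (d.items.map (fun p => (p.1, PySem.List.dedup p.2)))

theorem contains_dmap (d : PySem.Dict String (List String)) (k : String) :
    (dmap d).contains k = d.contains k := by
  simp [dmap, PySem.Dict.contains, List.any_map, Function.comp_def]

theorem keys_dmap (d : PySem.Dict String (List String)) : (dmap d).keys = d.keys := by
  simp [dmap, PySem.Dict.keys, Function.comp_def]

theorem getD_dmap (d : PySem.Dict String (List String)) (k : String) :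
    (dmap d).getD k [] = PySem.List.dedup (d.getD k []) := by
  simp only [dmap, PySem.Dict.getD, PySem.Dict.get?]
  induction d.items with
  | nil => simp [PySem.List.dedup, PySem.Set.ofList]
  | cons p rest ih =>
    by_cases h : p.1 == k
    · simp [List.find?, h]
    · simpa [List.find?, h] using ih

theorem map_overwrite_id {ν : Type} (l : List (String × ν)) (k : String) (v : ν)
    (h : ∀ p ∈ l, p.1 ≠ k) :
    l.map (fun p => if p.1 == k then (k, v) else p) = l := by
  induction l with
  | nil => rfl
  | cons p rest ih =>
    have h1 : p.1 ≠ k := h p (by simp)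
    simp only [List.map_cons, List.cons.injEq]
    refine ⟨by rw [if_neg (by simpa using h1)], ih (fun q hq => h q (by simp [hq]))⟩

theorem map_overwrite_found {ν : Type} (k : String) (v : ν) :
    ∀ (l : List (String × ν)), (l.map Prod.fst).Nodup →
    l.find? (fun p => p.1 == k) = some (k, v) →
    l.map (fun p => if p.1 == k then (k, v) else p) = l := by
  intro l
  induction l with
  | nil => intro _ h; simp at h
  | cons p rest ih =>
    intro hnd hf
    simp only [List.map_cons, List.nodup_cons] at hnd
    by_cases hp : p.1 = k
    · rw [List.find?_cons_of_pos (by simpa using hp)] at hf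
      have hpv : p = (k, v) := by injection hf
      simp only [List.map_cons, List.cons.injEq]
      refine ⟨by rw [if_pos (by simpa using hp), hpv], ?_⟩
      apply map_overwrite_id
      intro q hq hqk
      exact hnd.1 (hp ▸ hqk ▸ List.mem_map_of_mem hq)
    · rw [List.find?_cons_of_neg (by simpa using hp)] at hf
      simp only [List.map_cons, List.cons.injEq]
      exact ⟨by rw [if_neg (by simpa using hp)], ih hnd.2 hf⟩

theorem insert_getD_self {ν : Type} (d : PySem.Dict String ν) (k : String)
    (hnd : d.keys.Nodup) (h : d.contains k = true) (dflt : ν) :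
    d.insert k (d.getD k dflt) = d := by
  have hex : ∃ q ∈ d.items, (fun p => p.1 == k) q := by
    simpa [PySem.Dict.contains, List.any_eq_true] using h
  obtain ⟨q, hq⟩ : ∃ q, d.items.find? (fun p => p.1 == k) = some q := by
    have := List.find?_isSome.mpr hex
    exact Option.isSome_iff_exists.mp this
  have hq1 : q.1 = k := by simpa using List.find?_some hq
  have hget : d.getD k dflt = q.2 := by
    simp [PySem.Dict.getD, PySem.Dict.get?, hq]
  apply PySem.Dict.ext
  simp only [PySem.Dict.insert, h, if_pos, hget]
  apply map_overwrite_found k q.2 d.items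
  · simpa [PySem.Dict.keys, Function.comp_def] using hnd
  · have heq : some q = some (k, q.2) := by rw [← hq1]
    rw [← heq]; exact hq

theorem dmap_insert_overwrite (d : PySem.Dict String (List String)) (k : String)
    (h : d.contains k = true) (v : List String) :
    dmap (d.insert k v) = (dmap d).insert k (PySem.List.dedup v) := by
  apply PySem.Dict.ext
  simp only [dmap, PySem.Dict.insert, PySem.Dict.contains, List.any_map, Function.comp_def,
    List.map_map]
  simp only [PySem.Dict.contains] at h
  simp only [h, if_pos]
  rw [List.map_map]
  apply List.map_congr_left
  intro p _
  by_cases hp : p.1 = k <;> simp [hp]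

theorem dmap_insert_fresh (d : PySem.Dict String (List String)) (k : String)
    (h : d.contains k = false) :
    dmap (d.insert k []) = (dmap d).insert k [] := by
  apply PySem.Dict.ext
  simp only [dmap, PySem.Dict.insert, PySem.Dict.contains, List.any_map, Function.comp_def]
  simp only [PySem.Dict.contains] at h
  simp [h, PySem.List.dedup, PySem.Set.ofList]

theorem dedup_append_singleton (v : List String) (t : String) :
    PySem.List.dedup (v ++ [t])
      = if t ∈ PySem.List.dedup v then PySem.List.dedup v else PySem.List.dedup v ++ [t] := by
  simp only [PySem.List.dedup, PySem.Set.ofList_append_singleton, PySem.Set.add_eq_ite]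

theorem dmap_step (d : PySem.Dict String (List String)) (s t : String)
    (hnd : d.keys.Nodup) (hc : d.contains s = true) :
    (if t ∉ (dmap d).getD s [] then (dmap d).modify s [] (· ++ [t]) else dmap d)
      = dmap (d.modify s [] (· ++ [t])) := by
  have hnd' : (dmap d).keys.Nodup := by rw [keys_dmap]; exact hnd
  simp only [PySem.Dict.modify]
  rw [dmap_insert_overwrite d s hc, dedup_append_singleton, getD_dmap]
  by_cases hm : t ∈ PySem.List.dedup (d.getD s [])
  · rw [if_neg (not_not_intro hm), if_pos hm, ← getD_dmap]
    exact (insert_getD_self (dmap d) s hnd' (by rw [contains_dmap]; exact hc) []).symm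
  · rw [if_pos hm, if_neg hm]

theorem nodup_inner (s : String) (ts : List String) :
    ∀ d : PySem.Dict String (List String), d.keys.Nodup →
    (ts.foldl (fun dB f =>
        if f ≠ "" then dB.modify s [] (· ++ [if f = "NULL" then "" else f]) else dB) d).keys.Nodup := by
  induction ts with
  | nil => intro d h; exact h
  | cons f ts ih =>
    intro d h
    simp only [List.foldl_cons]
    by_cases hf : f = ""
    · simp only [hf, ne_eq, not_true_eq_false, ite_false]
      exact ih d h
    · simp only [ne_eq, hf, not_false_eq_true, ite_true]
      apply ih
      simp only [PySem.Dict.modify]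
      exact PySem.Dict.nodup_keys_insert _ _ _ h

theorem inner_eq (ts : List String) (s : String) :
    ∀ (d : PySem.Dict String (List String)), d.keys.Nodup → d.contains s = true →
    ts.foldl (fun dA f =>
        if f ≠ "" then
          let i_t := f
          let i_t := if i_t = "NULL" then "" else i_t
          if i_t ∉ dA.getD s [] then dA.modify s [] (· ++ [i_t]) else dA
        else dA) (dmap d)
      = dmap (ts.foldl (fun dB f =>
          if f ≠ "" then dB.modify s [] (· ++ [if f = "NULL" then "" else f]) else dB) d) := by
  induction ts with
  | nil => intro d _ _; rfl
  | cons f ts ih =>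
    intro d hnd hc
    simp only [List.foldl_cons]
    by_cases hf : f = ""
    · simp only [hf, ne_eq, not_true_eq_false, ite_false]
      exact ih d hnd hc
    · simp only [ne_eq, hf, not_false_eq_true, ite_true]
      rw [dmap_step d s (if f = "NULL" then "" else f) hnd hc]
      exact ih _ (by simp only [PySem.Dict.modify]; exact PySem.Dict.nodup_keys_insert _ _ _ hnd)
        (by simp only [PySem.Dict.modify, PySem.Dict.contains_insert]; simp)
theorem outer_eq (text : List String) :
    ∀ (d : PySem.Dict String (List String)), d.keys.Nodup →
    text.foldl (fun text_dict i =>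
        let i_s := (pySplitTab i).headD ""
        let text_dict := if text_dict.contains i_s = false then text_dict.insert i_s ([] : List String) else text_dict
        (PySem.List.pyRange 1 ((pySplitTab i).length : Int) 1).foldl (fun text_dict j =>
          if PySem.List.pyGetD (pySplitTab i) j "" ≠ "" then
            let i_t := PySem.List.pyGetD (pySplitTab i) j ""
            let i_t := if i_t = "NULL" then "" else i_t
            if i_t ∉ text_dict.getD i_s [] then text_dict.modify i_s [] (· ++ [i_t]) else text_dict
          else text_dict) text_dict) (dmap d)
      = dmap (text.foldl (fun acc row =>
          let fields := pySplitTab row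
          let src := fields.headD ""
          let acc := acc.setdefault src ([] : List String)
          fields.tail.foldl (fun acc f =>
            if f ≠ "" then acc.modify src [] (· ++ [if f = "NULL" then "" else f]) else acc) acc) d) := by
  induction text with
  | nil => intro d _; rfl
  | cons i text ih =>
    intro d hnd
    simp only [List.foldl_cons]
    set fields := pySplitTab i with hfields
    set s := fields.headD "" with hs
    by_cases hc : d.contains s = true
    · have h1 : (if (dmap d).contains s = false then (dmap d).insert s ([] : List String) else dmap d) = dmap d := by
        rw [contains_dmap, hc]; simp
      have h2 : d.setdefault s ([] : List String) = d := PySem.Dict.setdefault_of_contains d _ hc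
      rw [h1, h2]
      rw [PySem.List.foldl_pyRange_pyGetD' fields ""
        (fun dA f =>
          if f ≠ "" then
            let i_t := f
            let i_t := if i_t = "NULL" then "" else i_t
            if i_t ∉ dA.getD s [] then dA.modify s [] (· ++ [i_t]) else dA
          else dA) (dmap d) (by norm_num)]
      rw [show ((1 : Int).toNat) = 1 from rfl, List.drop_one]
      rw [inner_eq fields.tail s d hnd hc]
      exact ih _ (nodup_inner s fields.tail d hnd)
    · have hc' : d.contains s = false := by simpa using hc
      have h1 : (if (dmap d).contains s = false then (dmap d).insert s ([] : List String) else dmap d)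
          = dmap (d.insert s []) := by
        rw [contains_dmap, hc']; simp [dmap_insert_fresh d s hc']
      have h2 : d.setdefault s ([] : List String) = d.insert s [] :=
        PySem.Dict.setdefault_of_not_contains d _ hc'
      rw [h1, h2]
      have hnd1 : (d.insert s ([] : List String)).keys.Nodup := PySem.Dict.nodup_keys_insert _ _ _ hnd
      have hc1 : (d.insert s ([] : List String)).contains s = true := PySem.Dict.contains_insert_self _ _ _
      rw [PySem.List.foldl_pyRange_pyGetD' fields ""
        (fun dA f =>
          if f ≠ "" then
            let i_t := f
            let i_t := if i_t = "NULL" then "" else i_t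
            if i_t ∉ dA.getD s [] then dA.modify s [] (· ++ [i_t]) else dA
          else dA) (dmap (d.insert s [])) (by norm_num)]
      rw [show ((1 : Int).toNat) = 1 from rfl, List.drop_one]
      rw [inner_eq fields.tail s _ hnd1 hc1]
      exact ih _ (nodup_inner s fields.tail _ hnd1)
-- ===== VERDICT (by name: the statement is the Claim_ definition above) =====
theorem tsv_to_dict_spec : Claim_equal_tsv_to_dict := by
  intro text _
  unfold Spec_tsv_to_dict tsv_to_dict tsv_to_dict_alt
  have h := outer_eq text PySem.Dict.empty (by simp [PySem.Dict.keys, PySem.Dict.empty])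
  have hde : dmap PySem.Dict.empty = (PySem.Dict.empty : PySem.Dict String (List String)) := by
    simp [dmap, PySem.Dict.empty]
  rw [hde] at h
  rw [h]
  rfl
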